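-- pv_equiv track=rewrite | github.com/leonj1/cat-emails | extract_errors.py | extract_tracebacks
-- ===== SOURCE A (Python) =====
-- def extract_tracebacks(input_text: str) -> list[str]:
--     """
--     Extract all Python tracebacks from input text.
--
--     A traceback starts with "Traceback (most recent call last):"
--     and continues until we hit a blank line or a line that doesn't
--     start with spaces (indicating the end of the traceback).
--
--     Args:
--         input_text: The input text containing test output
--
--     Returns:
--         List of extracted traceback strings
--     """
--     tracebacks = []
--     lines = input_text.split('\n')
--
--     i = 0
--     while i < len(lines):
--         line = lines[i]
--
--         # Check if this line starts a traceback
--         if line.strip().startswith('Traceback (most recent call last):'):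
--             traceback_lines = [line]
--             i += 1
--
--             # Collect all lines that are part of this traceback
--             while i < len(lines):
--                 current_line = lines[i]
--
--                 # End of traceback: blank line or non-indented line after exception
--                 if not current_line.strip():
--                     break
--
--                 # Check if we've reached the exception line (not indented with File/spaces)
--                 # Exception lines typically don't start with spaces or "File"
--                 if (traceback_lines and
--                     not current_line.startswith('  ') and
--                     not current_line.startswith('File ') and
--                     not current_line.strip().startswith('^')):
--                     # This is likely the exception line
--                     traceback_lines.append(current_line)
--                     i += 1
--                     break
--
--                 traceback_lines.append(current_line)
--                 i += 1
--
--             # Join the traceback lines and add to results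
--             tracebacks.append('\n'.join(traceback_lines))
--         else:
--             i += 1
--
--     return tracebacks
-- ===== SOURCE B (Python) =====
-- def extract_tracebacks(input_text: str) -> list[str]:
--     """Single-pass state machine: accumulate the current traceback block (or None)."""
--     results = []
--     block = None
--     for line in input_text.split('\n'):
--         if block is None:
--             if line.strip().startswith('Traceback (most recent call last):'):
--                 block = [line]
--         elif not line.strip():
--             results.append('\n'.join(block))
--             block = None
--         elif (not line.startswith('  ')
--               and not line.startswith('File ')
--               and not line.strip().startswith('^')):
--             block.append(line)
--             results.append('\n'.join(block))
--             block = None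
--         else:
--             block.append(line)
--     if block is not None:
--         results.append('\n'.join(block))
--     return results
-- ===== Notes on version B (the rewrite author's own statement) =====
-- stated objective: simpler
-- what changed: Replaced A's index-driven outer/inner nested while loops with a single pass over the lines using an Option-typed current-block accumulator (fold + final flush), with the terminator checks kept in A's order.
import Mathlib
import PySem

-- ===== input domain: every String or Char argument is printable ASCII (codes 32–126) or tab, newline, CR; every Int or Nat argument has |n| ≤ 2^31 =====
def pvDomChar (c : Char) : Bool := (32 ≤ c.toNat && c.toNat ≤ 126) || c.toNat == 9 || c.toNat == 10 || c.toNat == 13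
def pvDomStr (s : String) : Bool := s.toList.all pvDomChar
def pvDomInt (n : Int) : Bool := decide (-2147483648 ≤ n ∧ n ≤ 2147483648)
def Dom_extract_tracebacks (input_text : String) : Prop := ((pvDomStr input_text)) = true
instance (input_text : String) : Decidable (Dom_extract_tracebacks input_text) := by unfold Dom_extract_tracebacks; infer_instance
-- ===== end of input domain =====

-- B replaces A's nested index-driven while loops by one fold over the lines with an
-- Option-typed "current block" state (objective: simpler); return value proved equal.

-- ===== PORT A =====
-- inner while loop of A: collects traceback lines into acc, returns (acc, remaining lines)
def tbInner (acc : List String) : List String → (List String × List String)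
  | [] => (acc, [])
  | cur :: rest =>
    if PySem.Str.strip cur = "" then (acc, cur :: rest)
    else if !acc.isEmpty && !(PySem.Str.startswith cur "  ") && !(PySem.Str.startswith cur "File ")
            && !(PySem.Str.startswith (PySem.Str.strip cur) "^")
    then (acc ++ [cur], rest)
    else tbInner (acc ++ [cur]) rest

theorem tbInner_rest_length (l : List String) : ∀ acc, ((tbInner acc l).2).length ≤ l.length := by
  induction l with
  | nil => intro acc; simp [tbInner]
  | cons cur rest ih =>
    intro acc
    simp only [tbInner]
    split
    · simp
    · split
      · simp
      · exact le_trans (ih _) (by simp)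

-- outer while loop of A
def tbOuter : List String → List String
  | [] => []
  | line :: rest =>
    if PySem.Str.startswith (PySem.Str.strip line) "Traceback (most recent call last):" then
      PySem.Str.join "\n" (tbInner [line] rest).1 :: tbOuter (tbInner [line] rest).2
    else tbOuter rest
termination_by l => l.length
decreasing_by
  · have := tbInner_rest_length rest [line]; simp; omega
  · simp

def extract_tracebacks (input_text : String) : List String :=
  tbOuter ((PySem.Str.split? input_text "\n").getD [])

-- ===== PORT B =====
-- one step of B's fold: state = (results so far, current block or none)
def altStep (st : List String × Option (List String)) (line : String) :
    List String × Option (List String) :=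
  match st.2 with
  | none =>
    if PySem.Str.startswith (PySem.Str.strip line) "Traceback (most recent call last):"
    then (st.1, some [line]) else (st.1, none)
  | some block =>
    if PySem.Str.strip line = "" then (st.1 ++ [PySem.Str.join "\n" block], none)
    else if !(PySem.Str.startswith line "  ") && !(PySem.Str.startswith line "File ")
            && !(PySem.Str.startswith (PySem.Str.strip line) "^")
    then (st.1 ++ [PySem.Str.join "\n" (block ++ [line])], none)
    else (st.1, some (block ++ [line]))

-- final flush of an open block
def altFinish (st : List String × Option (List String)) : List String :=
  match st.2 with
  | none => st.1
  | some block => st.1 ++ [PySem.Str.join "\n" block]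

def extract_tracebacks_alt (input_text : String) : List String :=
  altFinish ((((PySem.Str.split? input_text "\n").getD [])).foldl altStep ([], none))

-- ===== PRECONDITION & SPEC =====
def Spec_extract_tracebacks (input_text : String) (out : List String) : Prop := out = extract_tracebacks_alt input_text
instance (input_text : String) (out : List String) : Decidable (Spec_extract_tracebacks input_text out) := by unfold Spec_extract_tracebacks; infer_instance

-- ===== CLAIM (what is proved, stated in full; the proofs are below) =====
def Claim_equal_extract_tracebacks : Prop := ∀ (input_text : String), Dom_extract_tracebacks input_text → Spec_extract_tracebacks input_text (extract_tracebacks input_text)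

-- ===== LEMMAS AND PROOFS =====

theorem startswith_empty_header :
    PySem.Str.startswith (PySem.Str.strip "") "Traceback (most recent call last):" = false := by
  decide

-- a blank line (strip = "") never starts a traceback
theorem blank_not_header (x : String) (h : PySem.Str.strip x = "") :
    PySem.Str.startswith (PySem.Str.strip x) "Traceback (most recent call last):" = false := by
  rw [h]; exact startswith_empty_header

-- the core invariant: folding B's step from either state matches A's two loops
theorem fold_key (l : List String) :
    (∀ r, altFinish (l.foldl altStep (r, none)) = r ++ tbOuter l) ∧
    (∀ r b, b ≠ [] → altFinish (l.foldl altStep (r, some b)) =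
      r ++ (PySem.Str.join "\n" (tbInner b l).1 :: tbOuter (tbInner b l).2)) := by
  induction l with
  | nil =>
    refine ⟨fun r => by simp [altFinish, tbOuter], fun r b _ => by simp [altFinish, tbInner, tbOuter]⟩
  | cons x rest ih =>
    obtain ⟨ih1, ih2⟩ := ih
    constructor
    · intro r
      simp only [List.foldl_cons, altStep]
      by_cases h : PySem.Str.startswith (PySem.Str.strip x) "Traceback (most recent call last):" = true
      · rw [if_pos h, ih2 r [x] (by simp)]
        conv_rhs => rw [tbOuter]
        rw [if_pos h]
      · rw [if_neg h, ih1]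
        conv_rhs => rw [tbOuter]
        rw [if_neg h]
    · intro r b hb
      have hbe : b.isEmpty = false := by simpa using hb
      simp only [List.foldl_cons, altStep]
      by_cases h1 : PySem.Str.strip x = ""
      · rw [if_pos h1, ih1]
        conv_rhs => rw [tbInner]
        rw [if_pos h1]
        conv_rhs => rw [tbOuter]
        rw [if_neg (by rw [blank_not_header x h1]; exact Bool.false_ne_true)]
        simp
      · by_cases h2 : (!(PySem.Str.startswith x "  ") && !(PySem.Str.startswith x "File ")
            && !(PySem.Str.startswith (PySem.Str.strip x) "^")) = true
        · rw [if_neg h1, if_pos h2, ih1]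
          conv_rhs => rw [tbInner]
          rw [if_neg h1, if_pos (show (!b.isEmpty && !(PySem.Str.startswith x "  ")
                && !(PySem.Str.startswith x "File ")
                && !(PySem.Str.startswith (PySem.Str.strip x) "^")) = true by
              simp only [hbe, Bool.not_false, Bool.true_and]; exact h2)]
          simp
        · rw [if_neg h1, if_neg h2, ih2 r (b ++ [x]) (by simp)]
          conv_rhs => rw [tbInner]
          rw [if_neg h1, if_neg (show ¬ ((!b.isEmpty && !(PySem.Str.startswith x "  ")
                && !(PySem.Str.startswith x "File ")
                && !(PySem.Str.startswith (PySem.Str.strip x) "^")) = true) by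
              simp only [hbe, Bool.not_false, Bool.true_and]; exact h2)]

-- ===== VERDICT (by name: the statement is the Claim_ definition above) =====
theorem extract_tracebacks_spec : Claim_equal_extract_tracebacks := by
  intro input_text _
  unfold Spec_extract_tracebacks extract_tracebacks extract_tracebacks_alt
  rw [(fold_key _).1 []]
  simp
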